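-- pv_equiv track=rewrite | github.com/ArthurAkh/AdventOfCode | 2021/09/problem01/oldSolution.py | compare
-- ===== SOURCE A (Python) =====
-- def findMinMax(listA, direction=0):
--     if len(listA) == 1:
--         return listA[0]
--     if len(listA) < 2:
--         return None
--     if len(listA) == 2:
--         if direction == -1:
--             return min(listA[0], listA[1])
--         return max(listA[0], listA[1])
--     pop = listA.pop()
--     ans = findMinMax(listA, direction)
--     if direction == -1:
--         return min(ans, pop)
--     return max(ans, pop)
--
-- def compare(comparator, listToCompare, direction=0):
--     comparatorChar = []
--     for c in comparator:
--         comparatorChar.append(c)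
--
--     listToCompareChar = []
--     for l in listToCompare:
--         lChar = []
--         for c in l:
--             lChar.append(c)
--         listToCompareChar.append(lChar)
--
--
--     index = 0
--     listNotSame = len(listToCompare) * [0]
--     for l in listToCompareChar:
--         counter = 0
--         for char in comparatorChar:
--             for charT in l:
--                 if(char == charT):
--                     counter+=1
--                     break
--         listNotSame[index] = len(comparatorChar) - counter
--         index+=1
--
--     ans = findMinMax(listNotSame.copy(), direction)
--     index = listNotSame.index(int(ans))
--     l = listToCompare[index]
--
--     return ''.join(l)
-- ===== SOURCE B (Python) =====
-- def compare(comparator, listToCompare, direction=0):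
--     best = None
--     best_l = None
--     for l in listToCompare:
--         missing = sum(1 for ch in comparator if ch not in l)
--         if best is None or (missing < best if direction == -1 else missing > best):
--             best = missing
--             best_l = l
--     return ''.join(best_l)
-- ===== Notes on version B (the rewrite author's own statement) =====
-- stated objective: simpler
-- what changed: Replaced the precomputed mismatch table, the pop-and-recurse min/max helper and the final .index lookup with a single forward pass that keeps the best string and its missing-character count, updating only on strict improvement so the first extremum wins.
import Mathlib
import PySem

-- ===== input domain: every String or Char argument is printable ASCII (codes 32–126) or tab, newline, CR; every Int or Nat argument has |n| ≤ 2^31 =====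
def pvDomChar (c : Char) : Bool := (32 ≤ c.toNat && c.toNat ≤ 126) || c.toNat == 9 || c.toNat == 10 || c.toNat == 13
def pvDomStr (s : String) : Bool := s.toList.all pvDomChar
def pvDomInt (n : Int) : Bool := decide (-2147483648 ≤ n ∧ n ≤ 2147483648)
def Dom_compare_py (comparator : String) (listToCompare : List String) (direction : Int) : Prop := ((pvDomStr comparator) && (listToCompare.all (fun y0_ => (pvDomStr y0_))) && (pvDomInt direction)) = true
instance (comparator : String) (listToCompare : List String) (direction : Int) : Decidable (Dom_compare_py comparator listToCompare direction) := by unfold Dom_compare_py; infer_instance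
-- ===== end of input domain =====

-- B replaces A's mismatch table + pop-and-recurse min/max + .index lookup by one forward
-- pass keeping the best string so far (objective: simpler).


-- ===== PORT A =====
-- inner 'for char in comparatorChar: for charT in l: if char == charT: counter += 1; break'
-- (List.contains is exactly the scan-until-first-match the break performs)
def pvCounterA (comparatorChar lChars : List Char) : Int :=
  comparatorChar.foldl (fun cnt ch => if lChars.contains ch then cnt + 1 else cnt) 0

-- findMinMax(listA, direction): pops the LAST element and recurses; returns none where Python returns None
def findMinMax_py (listA : List Int) (direction : Int) : Option Int :=
  if listA.length = 1 then listA.head?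
  else if listA.length < 2 then none
  else if listA.length = 2 then
    some (if direction = -1 then min listA.headI listA.tail.headI
          else max listA.headI listA.tail.headI)
  else
    match findMinMax_py listA.dropLast direction, listA.getLast? with
    | some ans, some pop => some (if direction = -1 then min ans pop else max ans pop)
    | _, _ => none
termination_by listA.length
decreasing_by simp [List.length_dropLast]; omega

def compare_py (comparator : String) (listToCompare : List String) (direction : Int) : String :=
  let comparatorChar := comparator.toList
  let listToCompareChar := listToCompare.map String.toList
  let listNotSame := listToCompareChar.map
    (fun l => (comparatorChar.length : Int) - pvCounterA comparatorChar l)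
  match findMinMax_py listNotSame direction with
  | none => ""        -- Python raises TypeError (int(None)) here; excluded by Pre_
  | some ans =>
    match PySem.List.index? listNotSame ans with
    | none => ""      -- ValueError: unreachable, ans is an element of listNotSame
    | some idx =>
      match PySem.List.pyGet? listToCompare (idx : Int) with
      | some l => l   -- ''.join(l) over the characters of the string l is l itself
      | none => ""

-- ===== PORT B =====
-- missing = sum(1 for ch in comparator if ch not in l)
def pvMissing (comparator l : String) : Int :=
  comparator.toList.foldl (fun s ch => if l.toList.contains ch then s else s + 1) 0

def compare_py_alt (comparator : String) (listToCompare : List String) (direction : Int) : String :=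
  let best := listToCompare.foldl
    (fun acc l =>
      let missing := pvMissing comparator l
      match acc with
      | none => some (missing, l)
      | some (b, bl) =>
        if (if direction = -1 then missing < b else missing > b)
        then some (missing, l) else some (b, bl))
    none
  match best with
  | some (_, bl) => bl
  | none => ""      -- Python raises TypeError (''.join(None)) here; excluded by Pre_

-- ===== PRECONDITION & SPEC =====
-- On an empty listToCompare both A and B raise TypeError, so that input is excluded.
def Pre_compare_py (comparator : String) (listToCompare : List String) (direction : Int) : Prop :=
  listToCompare ≠ []
instance (comparator : String) (listToCompare : List String) (direction : Int) : Decidable (Pre_compare_py comparator listToCompare direction) := by unfold Pre_compare_py; infer_instance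

def pvWitness_compare_py : String × List String × Int := ("ab", ["a", "b"], -1)

def Spec_compare_py (comparator : String) (listToCompare : List String) (direction : Int) (out : String) : Prop := out = compare_py_alt comparator listToCompare direction
instance (comparator : String) (listToCompare : List String) (direction : Int) (out : String) : Decidable (Spec_compare_py comparator listToCompare direction out) := by unfold Spec_compare_py; infer_instance

-- ===== CLAIM (what is proved, stated in full; the proofs are below) =====
def Claim_equal_compare_py : Prop := ∀ (comparator : String) (listToCompare : List String) (direction : Int), Dom_compare_py comparator listToCompare direction → Pre_compare_py comparator listToCompare direction → Spec_compare_py comparator listToCompare direction (compare_py comparator listToCompare direction)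

-- ===== LEMMAS AND PROOFS =====

-- the combining step both versions use: min for direction = -1, max otherwise
def pvOp (d a b : Int) : Int := if d = -1 then min a b else max a b

-- A's per-string mismatch count equals B's: |comparator| - (# chars present) = # chars absent
theorem pvKey_eq (comparator l : String) :
    (comparator.toList.length : Int) - pvCounterA comparator.toList l.toList =
      pvMissing comparator l := by
  unfold pvCounterA pvMissing
  generalize comparator.toList = c
  induction c using List.reverseRecOn with
  | nil => simp
  | append_singleton xs x ih =>
    simp only [List.foldl_append, List.foldl_cons, List.foldl_nil, List.length_append,
      List.length_cons, List.length_nil]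
    split <;> push_cast <;> omega

theorem findMinMax_py_eq_foldl (d : Int) (rest : List Int) (a : Int) :
    findMinMax_py (a :: rest) d = some (rest.foldl (pvOp d) a) := by
  induction rest using List.reverseRecOn generalizing a with
  | nil =>
    rw [findMinMax_py, if_pos (by rfl : ([a] : List Int).length = 1)]
    rfl
  | append_singleton xs x ih =>
    cases xs with
    | nil =>
      rw [findMinMax_py, if_neg (by simp), if_neg (by simp), if_pos (by rfl)]
      simp [pvOp, List.headI]
    | cons y ys =>
      have h1 : (a :: (y :: ys ++ [x])).length ≠ 1 := by simp
      have h2 : ¬ (a :: (y :: ys ++ [x])).length < 2 := by simp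
      have h3 : (a :: (y :: ys ++ [x])).length ≠ 2 := by simp
      have hcat : a :: (y :: ys ++ [x]) = (a :: y :: ys) ++ [x] := by simp
      rw [findMinMax_py, if_neg h1, if_neg h2, if_neg h3, hcat, List.dropLast_concat,
        List.getLast?_concat, ih]
      simp [List.foldl_append, pvOp]

-- the fold pvOp result is an element of a :: rest
theorem foldl_pvOp_mem (d : Int) (rest : List Int) (a : Int) :
    rest.foldl (pvOp d) a ∈ a :: rest := by
  induction rest generalizing a with
  | nil => simp
  | cons y t ih =>
    simp only [List.foldl_cons]
    have h := ih (pvOp d a y)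
    have h2 : pvOp d a y = a ∨ pvOp d a y = y := by
      unfold pvOp; split
      · exact min_choice a y
      · exact max_choice a y
    rcases List.mem_cons.1 h with h0 | h0
    · rw [h0]; rcases h2 with h1 | h1 <;> simp [h1]
    · simp [h0]
  
-- the fold pvOp result is at least as good as its seed
theorem foldl_pvOp_le (d : Int) (rest : List Int) (a : Int) :
    (d = -1 → rest.foldl (pvOp d) a ≤ a) ∧ (d ≠ -1 → a ≤ rest.foldl (pvOp d) a) := by
  induction rest generalizing a with
  | nil => simp
  | cons y t ih =>
    have h := ih (pvOp d a y)
    constructor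
    · intro hd
      have : pvOp d a y ≤ a := by simp [pvOp, hd]
      simpa using le_trans (h.1 hd) this
    · intro hd
      have : a ≤ pvOp d a y := by simp [pvOp, hd]
      simpa using le_trans this (h.2 hd)

-- selecting listToCompare[listNotSame.index(v)] is finding the first element whose key is v
theorem index_get_eq_find (k : String → Int) (xs : List String) (v : Int)
    (hv : v ∈ xs.map k) :
    (match PySem.List.index? (xs.map k) v with
     | none => ""
     | some idx =>
       match PySem.List.pyGet? xs (idx : Int) with
       | some l => l
       | none => "") = ((xs.find? (fun l => k l = v)).getD "") := by
  induction xs with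
  | nil => simp at hv
  | cons x t ih =>
    rw [List.map_cons]
    by_cases hx : k x = v
    · rw [show (k x :: t.map k) = (v :: t.map k) by rw [hx],
        PySem.List.index?_cons_self v (t.map k)]
      rw [List.find?_cons_of_pos (by simp [hx])]
      simp only [Nat.cast_zero, PySem.List.pyGet?_zero_cons, Option.getD_some]
    · rw [PySem.List.index?_cons_of_ne (t.map k) hx]
      have hv' : v ∈ t.map k := by
        rcases List.mem_cons.1 hv with h | h
        · exact absurd h.symm hx
        · exact h
      rw [List.find?_cons_of_neg (by simp [hx])]
      have ih' := ih hv'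
      cases hidx : PySem.List.index? (t.map k) v with
      | none =>
        exact absurd hv' ((PySem.List.index?_eq_none_iff _ _).mp hidx)
      | some i =>
        rw [hidx] at ih'
        have hp : PySem.List.pyGet? (x :: t) (((i + 1 : Nat) : Int)) = PySem.List.pyGet? t (i : Int) := by
          push_cast
          exact PySem.List.pyGet?_cons_succ x t i
        simp only [Option.map_some]
        simp only [hp]
        simpa using ih'

-- the invariant of B's fold: value component folds with pvOp; element component is the seed
-- element if nothing strictly better appears, else the first element achieving the extremum
theorem alt_fold_invariant (comparator : String) (d : Int) (rest : List String) (b : Int) (bl : String) :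
    rest.foldl
      (fun acc l =>
        let missing := pvMissing comparator l
        match acc with
        | none => some (missing, l)
        | some (b, bl) =>
          if (if d = -1 then missing < b else missing > b)
          then some (missing, l) else some (b, bl))
      (some (b, bl)) =
    some (((rest.map (pvMissing comparator)).foldl (pvOp d) b),
      (if (rest.map (pvMissing comparator)).foldl (pvOp d) b = b then bl
       else (rest.find? (fun l => pvMissing comparator l = (rest.map (pvMissing comparator)).foldl (pvOp d) b)).getD "")) := by
  induction rest generalizing b bl with
  | nil => simp
  | cons y t ih =>
    simp only [List.foldl_cons, List.map_cons]
    by_cases hbet : (if d = -1 then pvMissing comparator y < b else pvMissing comparator y > b)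
    · rw [if_pos hbet]
      have hop : pvOp d b (pvMissing comparator y) = pvMissing comparator y := by
        unfold pvOp; split_ifs at hbet ⊢ <;> omega
      rw [ih (pvMissing comparator y) y]
      simp only [hop]
      set E := (t.map (pvMissing comparator)).foldl (pvOp d) (pvMissing comparator y) with hE
      have hEb : E ≠ b := by
        have h := foldl_pvOp_le d (t.map (pvMissing comparator)) (pvMissing comparator y)
        rw [← hE] at h
        by_cases hd : d = -1
        · have := h.1 hd; simp [hd] at hbet; omega
        · have := h.2 hd; simp [hd] at hbet; omega
      rw [if_neg hEb]
      by_cases hEm : E = pvMissing comparator y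
      · rw [if_pos hEm]
        have hf : List.find? (fun l => decide (pvMissing comparator l = E)) (y :: t) = some y := by
          apply List.find?_cons_of_pos; simp [hEm]
        simp [hf]
      · rw [if_neg hEm]
        have hf : List.find? (fun l => decide (pvMissing comparator l = E)) (y :: t) =
            List.find? (fun l => decide (pvMissing comparator l = E)) t := by
          apply List.find?_cons_of_neg; simp; exact fun h => hEm h.symm
        rw [hf]
    · rw [if_neg hbet]
      have hop : pvOp d b (pvMissing comparator y) = b := by
        unfold pvOp; split_ifs at hbet ⊢ <;> omega
      rw [ih b bl]
      simp only [hop]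
      set E := (t.map (pvMissing comparator)).foldl (pvOp d) b with hE
      by_cases hEb : E = b
      · simp [hEb]
      · rw [if_neg hEb, if_neg hEb]
        have hym : pvMissing comparator y ≠ E := by
          have h := foldl_pvOp_le d (t.map (pvMissing comparator)) b
          rw [← hE] at h
          by_cases hd : d = -1
          · have := h.1 hd; simp [hd] at hbet; omega
          · have := h.2 hd; simp [hd] at hbet; omega
        have hf : List.find? (fun l => decide (pvMissing comparator l = E)) (y :: t) =
            List.find? (fun l => decide (pvMissing comparator l = E)) t := by
          apply List.find?_cons_of_neg; simp [hym]
        rw [hf]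

-- ===== VERDICT (by name: the statement is the Claim_ definition above) =====
theorem compare_py_spec : Claim_equal_compare_py := by
  intro comparator listToCompare direction _hDom hPre
  unfold Spec_compare_py
  obtain ⟨x, rest, rfl⟩ : ∃ x' rest', listToCompare = x' :: rest' := by
    cases listToCompare with
    | nil => exact absurd rfl hPre
    | cons x rest => exact ⟨x, rest, rfl⟩
  have hmap : (x :: rest).map ((fun l => ((comparator.toList.length : Int) - pvCounterA comparator.toList l)) ∘ String.toList) = (x :: rest).map (pvMissing comparator) :=
    List.map_congr_left (fun l _ => pvKey_eq comparator l)
  have hEmem : ((rest.map (pvMissing comparator)).foldl (pvOp direction) (pvMissing comparator x)) ∈ (x :: rest).map (pvMissing comparator) := by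
    simpa using foldl_pvOp_mem direction (rest.map (pvMissing comparator)) (pvMissing comparator x)
  have hA := index_get_eq_find (pvMissing comparator) (x :: rest) _ hEmem
  simp only [List.map_cons] at hA
  have hB := alt_fold_invariant comparator direction rest (pvMissing comparator x) x
  have hA2 : compare_py comparator (x :: rest) direction =
      ((x :: rest).find? (fun l => pvMissing comparator l = (rest.map (pvMissing comparator)).foldl (pvOp direction) (pvMissing comparator x))).getD "" := by
    unfold compare_py
    simp only [List.map_map]
    rw [hmap, List.map_cons, findMinMax_py_eq_foldl]
    exact hA
  have hB2 : compare_py_alt comparator (x :: rest) direction =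
      (if (rest.map (pvMissing comparator)).foldl (pvOp direction) (pvMissing comparator x) = pvMissing comparator x then x
       else (rest.find? (fun l => pvMissing comparator l = (rest.map (pvMissing comparator)).foldl (pvOp direction) (pvMissing comparator x))).getD "") := by
    exact congrArg (fun o : Option (Int × String) => match o with | some (_, bl) => bl | none => "") hB
  rw [hA2, hB2]
  by_cases h : (rest.map (pvMissing comparator)).foldl (pvOp direction) (pvMissing comparator x) = pvMissing comparator x
  · rw [if_pos h, List.find?_cons_of_pos (by simp [h]), Option.getD_some]
  · rw [if_neg h, List.find?_cons_of_neg (by simp; exact fun hh => h hh.symm)]
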